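-- pv_equiv track=rewrite | github.com/soarsmu/attack-pretrain-models-of-code | Assess_CodeBERT/codesearch/CodeBERT/attack.py | get_identifier_posistions_from_code
-- ===== SOURCE A (Python) =====
-- def get_identifier_posistions_from_code(words_list: list, variable_names: list, language = 'python') -> dict:
--     '''
--     给定一串代码，以及variable的变量名，如: a
--     返回这串代码中这些变量名对应的位置.
--
--     此外，先需要对代码进行Parse并提取出token及其类型
--     还不能单纯地用tokenization，比如导入某一个个package，这个package也会被认为是name
--     但是这个name明显不能被修改
--     因此还是更加明确地找到被声明的变量的identifier.
--     '''
--     positions = {}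
--     for name in variable_names:
--         for index, token in enumerate(words_list):
--             if name == token:
--                 try:
--                     positions[name].append(index)
--                 except:
--                     positions[name] = [index]
--
--     return positions
-- ===== SOURCE B (Python) =====
-- def get_identifier_posistions_from_code(words_list: list, variable_names: list, language='python') -> dict:
--     # One pass builds an index table token -> all its positions; a second pass
--     # reads it per variable name, instead of rescanning words_list per name.
--     table = {}
--     for index, token in enumerate(words_list):
--         table.setdefault(token, []).append(index)
--     positions = {}
--     for name in variable_names:
--         if name in table:
--             positions.setdefault(name, []).extend(table[name])
--     return positions
-- ===== Notes on version B (the rewrite author's own statement) =====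
-- stated objective: faster
-- what changed: B builds a token->positions index in one pass over words_list and then looks each variable name up, instead of A's full rescan of words_list for every name.
import Mathlib
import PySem

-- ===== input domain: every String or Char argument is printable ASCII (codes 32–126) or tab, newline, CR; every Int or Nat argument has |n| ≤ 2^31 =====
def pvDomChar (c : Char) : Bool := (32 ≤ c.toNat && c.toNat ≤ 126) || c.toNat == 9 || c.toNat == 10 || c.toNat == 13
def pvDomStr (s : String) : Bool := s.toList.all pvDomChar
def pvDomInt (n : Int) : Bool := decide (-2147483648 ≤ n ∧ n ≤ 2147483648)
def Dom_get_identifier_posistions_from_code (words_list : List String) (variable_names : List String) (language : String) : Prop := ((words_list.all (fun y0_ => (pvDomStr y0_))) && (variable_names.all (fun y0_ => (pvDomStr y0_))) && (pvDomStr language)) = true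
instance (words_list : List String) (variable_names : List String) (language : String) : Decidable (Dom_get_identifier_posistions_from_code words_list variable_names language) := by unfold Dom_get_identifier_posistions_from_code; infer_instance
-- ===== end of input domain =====

-- B replaces A's per-name rescan of words_list by one index-building pass plus a lookup pass (faster: asymptotic).
-- ===== PORT A =====
def get_identifier_posistions_from_code (words_list : List String) (variable_names : List String) (language : String) : List (String × List Int) :=
  -- for name in variable_names: for index, token in enumerate(words_list): if name == token:
  --   try: positions[name].append(index) except: positions[name] = [index]
  (variable_names.foldl (fun positions name =>
    (PySem.List.enumerate words_list).foldl (fun positions p =>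
      if name == p.2 then
        match positions.get? name with
        | some l => positions.insert name (l ++ [p.1])   -- append succeeded
        | none   => positions.insert name [p.1]          -- KeyError -> except branch
      else positions) positions)
    PySem.Dict.empty).items

-- ===== PORT B =====
def get_identifier_posistions_from_code_alt (words_list : List String) (variable_names : List String) (language : String) : List (String × List Int) :=
  -- table: one pass over enumerate(words_list), table.setdefault(token, []).append(index)
  let table : PySem.Dict String (List Int) :=
    (PySem.List.enumerate words_list).foldl (fun t p => t.modify p.2 [] (· ++ [p.1])) PySem.Dict.empty
  -- read pass: positions.setdefault(name, []).extend(table[name]) when name in table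
  (variable_names.foldl (fun positions name =>
    if table.contains name then positions.modify name [] (· ++ table.getD name []) else positions)
    PySem.Dict.empty).items

-- ===== PRECONDITION & SPEC =====
def Spec_get_identifier_posistions_from_code (words_list : List String) (variable_names : List String) (language : String) (out : List (String × List Int)) : Prop := out = get_identifier_posistions_from_code_alt words_list variable_names language
instance (words_list : List String) (variable_names : List String) (language : String) (out : List (String × List Int)) : Decidable (Spec_get_identifier_posistions_from_code words_list variable_names language out) := by unfold Spec_get_identifier_posistions_from_code; infer_instance

-- ===== CLAIM (what is proved, stated in full; the proofs are below) =====
def Claim_equal_get_identifier_posistions_from_code : Prop := ∀ (words_list : List String) (variable_names : List String) (language : String), Dom_get_identifier_posistions_from_code words_list variable_names language → Spec_get_identifier_posistions_from_code words_list variable_names language (get_identifier_posistions_from_code words_list variable_names language)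

-- ===== LEMMAS AND PROOFS =====



-- index positions of the pairs in l whose token equals name, in order
def occIn (l : List (Int × String)) (name : String) : List Int :=
  (l.filter (fun p => p.2 == name)).map (·.1)

theorem modify_modify_self (d : PySem.Dict String (List Int)) (k : String)
    (f g : List Int → List Int) :
    (d.modify k [] f).modify k [] g = d.modify k [] (fun x => g (f x)) := by
  simp [PySem.Dict.modify, PySem.Dict.getD_insert_self, PySem.Dict.insert_insert_self]

theorem stepA_eq_modify (d : PySem.Dict String (List Int)) (name : String) (i : Int) :
    (match d.get? name with
     | some l => d.insert name (l ++ [i])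
     | none   => d.insert name [i]) = d.modify name [] (· ++ [i]) := by
  cases h : d.get? name <;>
    simp [PySem.Dict.modify, PySem.Dict.getD_eq_get?_getD, h]

theorem innerA_eq (l : List (Int × String)) (name : String)
    (d : PySem.Dict String (List Int)) :
    l.foldl (fun d p =>
      if name == p.2 then
        match d.get? name with
        | some xs => d.insert name (xs ++ [p.1])
        | none    => d.insert name [p.1]
      else d) d
    = if occIn l name = [] then d else d.modify name [] (· ++ occIn l name) := by
  induction l generalizing d with
  | nil => simp [occIn]
  | cons p t ih =>
    simp only [List.foldl_cons]
    by_cases hp : p.2 = name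
    · have h1 : (if name == p.2 then
          (match d.get? name with
           | some xs => d.insert name (xs ++ [p.1])
           | none    => d.insert name [p.1])
          else d) = d.modify name [] (· ++ [p.1]) := by
        rw [if_pos (by simp [hp]), stepA_eq_modify]
      have hocc : occIn (p :: t) name = p.1 :: occIn t name := by simp [occIn, hp]
      rw [h1, ih, hocc]
      by_cases ht : occIn t name = []
      · rw [if_pos ht, if_neg (by simp), ht]
      · rw [if_neg ht, if_neg (by simp), modify_modify_self]
        congr 1
        funext x
        simp
    · have hne : (p.2 == name) = false := beq_false_of_ne hp
      have hne' : (name == p.2) = false := beq_false_of_ne (fun h => hp h.symm)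
      have hocc : occIn (p :: t) name = occIn t name := by simp [occIn, hne]
      rw [if_neg (by simp [hne']), ih, hocc]

theorem table_getD (wl : List String) (name : String) :
    ((PySem.List.enumerate wl).foldl (fun t p => t.modify p.2 [] (· ++ [p.1])) PySem.Dict.empty).getD name []
      = occIn (PySem.List.enumerate wl) name := by
  have h : (PySem.List.enumerate wl).foldl (fun t p => t.modify p.2 [] (· ++ [p.1])) PySem.Dict.empty
      = ((PySem.List.enumerate wl).map Prod.swap).foldl (fun t p => t.modify p.1 [] (· ++ [p.2])) PySem.Dict.empty := by
    rw [List.foldl_map]; rfl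
  rw [h, PySem.Dict.getD_foldl_modify_append]
  simp [occIn, List.filter_map, Function.comp_def]

theorem table_contains (wl : List String) (name : String) :
    ((PySem.List.enumerate wl).foldl (fun t p => t.modify p.2 [] (· ++ [p.1])) PySem.Dict.empty).contains name = true
      ↔ name ∈ wl := by
  rw [PySem.Dict.contains_iff_mem_keys, PySem.Dict.keys_foldl_modify_key]
  simp [PySem.List.map_snd_enumerate]

theorem occ_nil_iff (wl : List String) (name : String) :
    occIn (PySem.List.enumerate wl) name = [] ↔ name ∉ wl := by
  simp only [occIn, List.map_eq_nil_iff, List.filter_eq_nil_iff, beq_iff_eq]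
  constructor
  · intro h hmem
    rw [← PySem.List.map_snd_enumerate wl (0 : Int)] at hmem
    obtain ⟨p, hp, hps⟩ := List.mem_map.mp hmem
    exact h p hp hps
  · intro h p hp hps
    exact h (by rw [← PySem.List.map_snd_enumerate wl (0 : Int)]; exact List.mem_map.mpr ⟨p, hp, hps⟩)

theorem step_eq (wl : List String) (name : String) (d : PySem.Dict String (List Int)) :
    (PySem.List.enumerate wl).foldl (fun d p =>
      if name == p.2 then
        match d.get? name with
        | some xs => d.insert name (xs ++ [p.1])
        | none    => d.insert name [p.1]
      else d) d
    = (if ((PySem.List.enumerate wl).foldl (fun t p => t.modify p.2 [] (· ++ [p.1])) PySem.Dict.empty).contains name then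
         d.modify name [] (· ++ ((PySem.List.enumerate wl).foldl (fun t p => t.modify p.2 [] (· ++ [p.1])) PySem.Dict.empty).getD name [])
       else d) := by
  rw [innerA_eq, table_getD]
  by_cases hm : name ∈ wl
  · rw [if_neg (by rw [occ_nil_iff]; simp [hm]),
        if_pos (by rw [table_contains]; exact hm)]
  · rw [if_pos ((occ_nil_iff wl name).mpr hm),
        if_neg ((not_congr (table_contains wl name)).mpr hm)]

theorem folds_eq (wl vn : List String) (d : PySem.Dict String (List Int)) :
    vn.foldl (fun positions name =>
      (PySem.List.enumerate wl).foldl (fun positions p =>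
        if name == p.2 then
          match positions.get? name with
          | some l => positions.insert name (l ++ [p.1])
          | none   => positions.insert name [p.1]
        else positions) positions) d
    = vn.foldl (fun positions name =>
        if ((PySem.List.enumerate wl).foldl (fun t p => t.modify p.2 [] (· ++ [p.1])) PySem.Dict.empty).contains name then
          positions.modify name [] (· ++ ((PySem.List.enumerate wl).foldl (fun t p => t.modify p.2 [] (· ++ [p.1])) PySem.Dict.empty).getD name [])
        else positions) d := by
  induction vn generalizing d with
  | nil => rfl
  | cons n t ih =>
    simp only [List.foldl_cons]
    rw [step_eq]
    exact ih _

-- ===== VERDICT (by name: the statement is the Claim_ definition above) =====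
theorem get_identifier_posistions_from_code_spec : Claim_equal_get_identifier_posistions_from_code := by
  intro wl vn lang _
  show get_identifier_posistions_from_code wl vn lang = get_identifier_posistions_from_code_alt wl vn lang
  unfold get_identifier_posistions_from_code get_identifier_posistions_from_code_alt
  exact congrArg PySem.Dict.items (folds_eq wl vn PySem.Dict.empty)
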